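-- pv_equiv track=rewrite | github.com/noobcakes33/Ladder11 | 320A_Magic_Numbers.py | solution
-- ===== SOURCE A (Python) =====
-- def solution(n):
--     m = set(n)
--     for i in m:
--         if i not in ["1", "4"]:
--             return "NO"
--
--     if len(m) > 2 or n[0] != "1":
--         return "NO"
--     else:
--         if "444" in n:
--             return "NO"
--         else:
--             return "YES"
-- ===== SOURCE B (Python) =====
-- def solution(n):
--     if n[0] != "1":
--         return "NO"
--     run = 0
--     for c in n:
--         if c == "4":
--             run += 1
--             if run == 3:
--                 return "NO"
--         elif c == "1":
--             run = 0
--         else: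
--             return "NO"
--     return "YES"
-- ===== Notes on version B (the rewrite author's own statement) =====
-- stated objective: simpler
-- what changed: Replaced the set construction, membership scan and '444' substring search by one linear pass that keeps a run-length counter of consecutive '4's (rejecting at three) and rejects any character other than '1'/'4'.
import Mathlib
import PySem

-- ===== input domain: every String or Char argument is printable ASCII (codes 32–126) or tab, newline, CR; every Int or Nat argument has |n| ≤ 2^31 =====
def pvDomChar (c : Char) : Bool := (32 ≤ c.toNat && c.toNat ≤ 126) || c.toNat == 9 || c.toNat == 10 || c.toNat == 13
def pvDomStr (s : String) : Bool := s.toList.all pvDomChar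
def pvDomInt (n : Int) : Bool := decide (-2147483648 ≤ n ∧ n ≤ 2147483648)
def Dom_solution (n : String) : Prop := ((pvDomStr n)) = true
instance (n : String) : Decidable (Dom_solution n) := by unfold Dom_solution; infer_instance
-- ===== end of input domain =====

-- B replaces A's set scan + '444' substring search by one linear pass with a
-- run-length counter of consecutive '4's (objective: simpler).

-- ===== PORT A =====
-- the 'for i in m: if i not in ["1","4"]: return "NO"' loop (value is order-independent)
def aLoop : List Char → Option String
  | [] => none
  | i :: rest => if i ∉ ['1', '4'] then some "NO" else aLoop rest

def solution (n : String) : String :=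
  match aLoop (PySem.Set.ofList n.toList) with
  | some r => r
  | none =>
    -- n[0] raises IndexError on the empty string; that input is excluded by Pre_solution
    if 2 < (PySem.Set.ofList n.toList).length ∨ PySem.Str.pyGet? n 0 ≠ some '1' then "NO"
    else if PySem.Str.isIn "444" n then "NO" else "YES"

-- ===== PORT B =====
-- the single pass with the run-length counter of consecutive '4's
def altLoop : List Char → Nat → String
  | [], _ => "YES"
  | c :: rest, run =>
    if c = '4' then
      if run + 1 = 3 then "NO" else altLoop rest (run + 1)
    else if c = '1' then altLoop rest 0
    else "NO"

def solution_alt (n : String) : String :=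
  -- n[0] raises IndexError on the empty string; that input is excluded by Pre_solution
  if PySem.Str.pyGet? n 0 ≠ some '1' then "NO"
  else altLoop n.toList 0

-- ===== PRECONDITION & SPEC =====
-- Pre_ excludes only the empty string, on which both A and B raise IndexError at n[0].
def Pre_solution (n : String) : Prop := n.toList ≠ []
instance (n : String) : Decidable (Pre_solution n) := by unfold Pre_solution; infer_instance

def pvWitness_solution : String := "144"

def Spec_solution (n : String) (out : String) : Prop := out = solution_alt n
instance (n : String) (out : String) : Decidable (Spec_solution n out) := by unfold Spec_solution; infer_instance

-- ===== CLAIM (what is proved, stated in full; the proofs are below) =====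
def Claim_equal_solution : Prop := ∀ (n : String), Dom_solution n → Pre_solution n → Spec_solution n (solution n)

-- ===== LEMMAS AND PROOFS =====

-- A's set loop finds no offender when every character is '1' or '4'
theorem aLoop_none {s : List Char} (h : ∀ c ∈ s, c ∈ ['1', '4']) : aLoop s = none := by
  induction s with
  | nil => rfl
  | cons i rest ih =>
    have hi := h i (List.mem_cons_self ..)
    show (if i ∉ ['1', '4'] then some "NO" else aLoop rest) = none
    rw [if_neg (not_not.mpr hi)]
    exact ih fun c hc => h c (List.mem_cons_of_mem _ hc)

-- A's set loop returns "NO" as soon as some character is neither '1' nor '4'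
theorem aLoop_no {s : List Char} (h : ∃ c ∈ s, c ∉ ['1', '4']) : aLoop s = some "NO" := by
  induction s with
  | nil => simp at h
  | cons i rest ih =>
    show (if i ∉ ['1', '4'] then some "NO" else aLoop rest) = some "NO"
    by_cases hi : i ∈ ['1', '4']
    · rw [if_neg (not_not.mpr hi)]
      apply ih
      rcases h with ⟨c, hc, hcbad⟩
      rcases List.mem_cons.mp hc with rfl | hc'
      · exact absurd hi hcbad
      · exact ⟨c, hc', hcbad⟩
    · rw [if_pos hi]

-- B's loop returns "NO" whenever some character is neither '1' nor '4'
theorem altLoop_bad : ∀ {l : List Char}, (∃ c ∈ l, c ∉ ['1', '4']) →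
    ∀ run, altLoop l run = "NO" := by
  intro l
  induction l with
  | nil => intro h; simp at h
  | cons c rest ih =>
    intro h run
    rcases h with ⟨d, hd, hdbad⟩
    rcases List.mem_cons.mp hd with rfl | hd'
    · have h1 : d ≠ '1' := fun e => hdbad (by simp [e])
      have h4 : d ≠ '4' := fun e => hdbad (by simp [e])
      simp [altLoop, h1, h4]
    · have hrest : ∃ c ∈ rest, c ∉ ['1', '4'] := ⟨d, hd', hdbad⟩
      by_cases h4 : c = '4'
      · subst h4
        have he : altLoop ('4' :: rest) run
            = if run + 1 = 3 then "NO" else altLoop rest (run + 1) := by simp [altLoop]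
        rw [he]
        split
        · rfl
        · exact ih hrest _
      · by_cases h1 : c = '1'
        · subst h1
          have he : altLoop ('1' :: rest) run = altLoop rest 0 := by simp [altLoop]
          rw [he]
          exact ih hrest 0
        · simp [altLoop, h1, h4]

-- on clean input, B's loop answers exactly the '444'-infix question,
-- with `run` pending consecutive '4's already seen
theorem altLoop_clean : ∀ {l : List Char}, (∀ c ∈ l, c ∈ ['1', '4']) →
    ∀ run, run ≤ 2 →
      altLoop l run =
        if ['4', '4', '4'] <:+: (List.replicate run '4' ++ l) then "NO" else "YES" := by
  intro l
  induction l with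
  | nil =>
    intro _ run hrun
    have hni : ¬ ['4', '4', '4'] <:+: List.replicate run '4' := by
      intro hinf
      have := hinf.length_le
      simp at this
      omega
    simp [altLoop, hni]
  | cons c rest ih =>
    intro h run hrun
    have hc := h c (List.mem_cons_self ..)
    have hrest : ∀ d ∈ rest, d ∈ ['1', '4'] := fun d hd => h d (List.mem_cons_of_mem _ hd)
    by_cases h4 : c = '4'
    · subst h4
      by_cases h3 : run + 1 = 3
      · have hrun2 : run = 2 := by omega
        subst hrun2
        have hinf : ['4', '4', '4'] <:+: (List.replicate 2 '4' ++ '4' :: rest) :=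
          ⟨[], rest, by simp [List.replicate]⟩
        rw [if_pos hinf]
        simp [altLoop]
      · have hrun' : run + 1 ≤ 2 := by omega
        have hsplit : List.replicate run '4' ++ '4' :: rest
            = List.replicate (run + 1) '4' ++ rest := by
          simp [List.replicate_succ']
        rw [hsplit]
        calc altLoop ('4' :: rest) run = altLoop rest (run + 1) := by simp [altLoop, h3]
          _ = _ := ih hrest (run + 1) hrun'
    · have h1 : c = '1' := by
        rcases (by simpa using hc : c = '1' ∨ c = '4') with h | h
        · exact h
        · exact absurd h h4
      subst h1
      have hcross : (['4', '4', '4'] <:+: (List.replicate run '4' ++ '1' :: rest))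
          ↔ ['4', '4', '4'] <:+: rest := by
        interval_cases run <;>
          simp [List.replicate, List.infix_cons_iff, List.cons_prefix_cons]
      have hrec := ih hrest 0 (by omega)
      simp only [List.replicate_zero, List.nil_append] at hrec
      calc altLoop ('1' :: rest) run = altLoop rest 0 := by simp [altLoop]
        _ = if ['4', '4', '4'] <:+: rest then "NO" else "YES" := hrec
        _ = _ := (if_congr hcross rfl rfl).symm

-- a duplicate-free list over the two-element alphabet has at most two elements
theorem nodup_len_le_two {m : List Char} (hnd : m.Nodup) (h : ∀ c ∈ m, c ∈ ['1', '4']) :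
    m.length ≤ 2 := by
  have hsub : m.toFinset ⊆ ({'1', '4'} : Finset Char) := by
    intro x hx
    simpa using h x (List.mem_toFinset.mp hx)
  have hcard := Finset.card_le_card hsub
  have hlen : m.toFinset.card = m.length := List.toFinset_card_of_nodup hnd
  have : ({'1', '4'} : Finset Char).card ≤ 2 := by decide
  omega

-- ===== VERDICT (by name: the statement is the Claim_ definition above) =====
theorem solution_spec : Claim_equal_solution := by
  intro n _ hpre
  unfold Spec_solution solution solution_alt
  obtain ⟨c, l, hl⟩ : ∃ c l, n.toList = c :: l := by
    cases hn : n.toList with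
    | nil => exact absurd hn hpre
    | cons c l => exact ⟨c, l, rfl⟩
  have hget : PySem.Str.pyGet? n 0 = some c := by
    have h0 := PySem.Str.pyGet?_natCast (s := n) (n := 0)
    rw [hl] at h0
    simpa using h0
  by_cases hbad : ∃ d ∈ n.toList, d ∉ ['1', '4']
  · -- some character outside {'1','4'}: both sides return "NO"
    have hbadm : ∃ d ∈ PySem.Set.ofList n.toList, d ∉ ['1', '4'] := by
      rcases hbad with ⟨d, hd, hdbad⟩
      exact ⟨d, (PySem.Set.mem_ofList ..).mpr hd, hdbad⟩
    rw [aLoop_no hbadm]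
    by_cases h1 : c = '1'
    · subst h1
      rw [hl] at hbad
      simp [hl, altLoop_bad hbad 0]
    · rw [hget, if_pos (show some c ≠ some '1' from by simp [h1])]
  · have hclean : ∀ d ∈ n.toList, d ∈ ['1', '4'] :=
      fun d hd => not_not.mp fun hn => hbad ⟨d, hd, hn⟩
    have hcleanm : ∀ d ∈ PySem.Set.ofList n.toList, d ∈ ['1', '4'] :=
      fun d hd => hclean d ((PySem.Set.mem_ofList ..).mp hd)
    rw [aLoop_none hcleanm]
    have hlen : ¬ 2 < (PySem.Set.ofList n.toList).length := by
      have := nodup_len_le_two (PySem.Set.nodup_ofList ..) hcleanm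
      omega
    by_cases h1 : c = '1'
    · subst h1
      have hiff : PySem.Str.isIn "444" n = true ↔ ['4', '4', '4'] <:+: n.toList := by
        simpa using PySem.Str.isIn_iff_infix "444" n
      have halt := altLoop_clean hclean 0 (by omega)
      simp only [List.replicate_zero, List.nil_append] at halt
      have hBside : (if PySem.Str.pyGet? n 0 ≠ some '1' then "NO" else altLoop n.toList 0)
          = altLoop n.toList 0 := by rw [hget]; simp
      have hAcond : ¬ (2 < (PySem.Set.ofList n.toList).length
          ∨ PySem.Str.pyGet? n 0 ≠ some '1') := by rw [hget]; simp [hlen]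
      rw [hBside, if_neg hAcond, halt]
      exact if_congr hiff rfl rfl
    · have hne : (some c : Option Char) ≠ some '1' := by simp [h1]
      rw [hget, if_pos (Or.inr hne), if_pos hne]
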